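-- pv_equiv track=rewrite | github.com/dahaihu/standard | algorithm/美丽值.py | func
-- ===== SOURCE A (Python) =====
-- def func(nums):
--     res = 0
--     mark = [[(set(), 0) for _ in range(len(nums))] for _ in range(len(nums))]
--     for i in range(len(nums)):
--         for j in range(i, len(nums)):
--             if nums[j] in mark[i][j-1][0]:
--                 mark[i][j] = mark[i][j-1]
--             else:
--                 mark[i][j] = (mark[i][j-1][0] | {nums[j]}, mark[i][j-1][1] + nums[j])
--             res += mark[i][j][1]
--     return res
-- ===== SOURCE B (Python) =====
-- def func(nums):
--     n = len(nums)
--     res = 0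
--     last = {}
--     for k, v in enumerate(nums):
--         prev = last.get(v, -1)
--         res += v * (k - prev) * (n - k)
--         last[v] = k
--     return res
-- ===== Notes on version B (the rewrite author's own statement) =====
-- stated objective: faster
-- what changed: Replaces the O(n^2)-subarray enumeration with an O(n^3)-ish set/table per subarray by a single pass computing each element's contribution nums[k]*(k-prev)*(n-k) via a last-seen-index dictionary.
import Mathlib
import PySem

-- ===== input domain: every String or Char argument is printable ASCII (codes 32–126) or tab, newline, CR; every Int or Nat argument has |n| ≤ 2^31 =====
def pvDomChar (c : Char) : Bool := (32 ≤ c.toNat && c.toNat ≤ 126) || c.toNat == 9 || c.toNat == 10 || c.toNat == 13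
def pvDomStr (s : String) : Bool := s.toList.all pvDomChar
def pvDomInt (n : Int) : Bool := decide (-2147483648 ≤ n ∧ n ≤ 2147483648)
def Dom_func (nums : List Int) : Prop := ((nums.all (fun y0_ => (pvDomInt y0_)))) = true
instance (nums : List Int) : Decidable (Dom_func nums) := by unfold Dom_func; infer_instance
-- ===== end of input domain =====

-- B replaces A's cubic per-subarray set/table accumulation by one O(n) pass adding each
-- element's contribution nums[k]*(k-prev)*(n-k) from a last-seen-index dictionary.

-- ===== PORT A =====
-- inner loop body: one step of 'for j in range(i, len(nums))'
-- (mark[i][j-1] never raises in A — j-1 ≥ -1 wraps to a valid index — so the total pyGetD/pySetD forms are exact)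
def funcInnerBody (nums : List Int) (i : Int)
    (st : Int × List (List (PySem.Set Int × Int))) (j : Int) :
    Int × List (List (PySem.Set Int × Int)) :=
  let mark := st.2
  let row := PySem.List.pyGetD mark i []
  let prev := PySem.List.pyGetD row (j - 1) (PySem.Set.empty, 0)
  let v := PySem.List.pyGetD nums j 0
  let cur := if PySem.Set.contains prev.1 v then prev
             else (PySem.Set.union prev.1 [v], prev.2 + v)
  let mark' := PySem.List.pySetD mark i (PySem.List.pySetD row j cur)
  (st.1 + cur.2, mark')  -- res += mark[i][j][1], which is cur's second component

def funcOuterBody (nums : List Int)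
    (st : Int × List (List (PySem.Set Int × Int))) (i : Int) :
    Int × List (List (PySem.Set Int × Int)) :=
  (PySem.List.pyRange i (nums.length : Int) 1).foldl (funcInnerBody nums i) st

def func (nums : List Int) : Int :=
  let mark : List (List (PySem.Set Int × Int)) :=
    (PySem.List.pyRange 0 (nums.length : Int) 1).map (fun _ =>
      (PySem.List.pyRange 0 (nums.length : Int) 1).map (fun _ =>
        ((PySem.Set.empty : PySem.Set Int), (0 : Int))))
  ((PySem.List.pyRange 0 (nums.length : Int) 1).foldl (funcOuterBody nums) (0, mark)).1

-- ===== PORT B =====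
def funcAltBody (n : Int) (st : Int × PySem.Dict Int Int) (kv : Int × Int) :
    Int × PySem.Dict Int Int :=
  let prev := PySem.Dict.getD st.2 kv.2 (-1)
  (st.1 + kv.2 * (kv.1 - prev) * (n - kv.1), PySem.Dict.insert st.2 kv.2 kv.1)

def func_alt (nums : List Int) : Int :=
  ((PySem.List.enumerate nums 0).foldl (funcAltBody (nums.length : Int)) (0, PySem.Dict.empty)).1

-- ===== PRECONDITION & SPEC =====
def Spec_func (nums : List Int) (out : Int) : Prop := out = func_alt nums
instance (nums : List Int) (out : Int) : Decidable (Spec_func nums out) := by unfold Spec_func; infer_instance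

-- ===== CLAIM (what is proved, stated in full; the proofs are below) =====
def Claim_equal_func : Prop := ∀ (nums : List Int), Dom_func nums → Spec_func nums (func nums)

-- ===== LEMMAS AND PROOFS =====

-- the initial cell value (set(), 0)
def pvD0 : PySem.Set Int × Int := (PySem.Set.empty, 0)

-- pure model of one row scan of A: running (distinct set, distinct sum), adding the sum at each step
def drowA : (PySem.Set Int × Int) → List Int → Int
  | _, [] => 0
  | c, v :: l =>
      let cur := if PySem.Set.contains c.1 v then c else (PySem.Set.union c.1 [v], c.2 + v)
      cur.2 + drowA cur l

-- index of the last occurrence of v in l, -1 if absent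
def lastOcc : List Int → Int → Int
  | [], _ => -1
  | x :: t, v => if 0 ≤ lastOcc t v then lastOcc t v + 1 else if x = v then 0 else -1

-- the per-position contribution both programs sum
def contrib (nums : List Int) (k : Nat) : Int :=
  nums.getD k 0 * ((k : Int) - lastOcc (nums.take k) (nums.getD k 0)) * ((nums.length : Int) - (k : Int))

-- contribution of position k of l to a row that started with prefix 'pre' already seen
def cIf (pre l : List Int) (k : Nat) : Int :=
  if l.getD k 0 ∈ pre ++ l.take k then 0 else l.getD k 0

theorem lastOcc_ge (l : List Int) (v : Int) : -1 ≤ lastOcc l v := by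
  induction l with
  | nil => simp [lastOcc]
  | cons x t ih => simp only [lastOcc]; split_ifs <;> omega

theorem lastOcc_lt (l : List Int) (v : Int) : lastOcc l v < (l.length : Int) := by
  induction l with
  | nil => simp [lastOcc]
  | cons x t ih => simp only [lastOcc, List.length_cons]; push_cast; split_ifs <;> omega

theorem lastOcc_nonneg_iff (l : List Int) (v : Int) : 0 ≤ lastOcc l v ↔ v ∈ l := by
  induction l with
  | nil => simp [lastOcc]
  | cons x t ih =>
    simp only [lastOcc, List.mem_cons]
    split_ifs with h1 h2
    · have hv : v ∈ t := ih.mp h1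
      simp [hv]; omega
    · subst h2; simp
    · constructor
      · intro h; omega
      · rintro (rfl | hv)
        · exact absurd rfl h2
        · exact absurd (ih.mpr hv) h1

theorem mem_drop_iff_lastOcc (i : Nat) (l : List Int) (v : Int) :
    v ∈ l.drop i ↔ (i : Int) ≤ lastOcc l v := by
  induction i generalizing l with
  | zero => simpa using (lastOcc_nonneg_iff l v).symm
  | succ i ih =>
    cases l with
    | nil => simp [lastOcc]
    | cons x t =>
      rw [List.drop_succ_cons, ih]
      simp only [lastOcc]
      have := lastOcc_ge t v
      split_ifs with h1 h2 <;> push_cast <;> omega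

theorem lastOcc_append_singleton (l : List Int) (x v : Int) :
    lastOcc (l ++ [x]) v = if v = x then (l.length : Int) else lastOcc l v := by
  induction l with
  | nil =>
    rcases eq_or_ne v x with rfl | h
    · simp [lastOcc]
    · simp [lastOcc, h, (Ne.symm h : x ≠ v)]
  | cons y t ih =>
    rw [List.cons_append]
    simp only [lastOcc, ih, List.length_cons]
    rcases eq_or_ne v x with rfl | h
    · rw [if_pos rfl, if_pos rfl, if_pos (by positivity)]
      push_cast; ring
    · rw [if_neg h, if_neg h]

theorem sum_ite_le (v p : Int) (k : Nat) (h1 : -1 ≤ p) (h2 : p < (k : Int)) :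
    (∑ i ∈ Finset.range (k + 1), (if (i : Int) ≤ p then 0 else v)) = v * ((k : Int) - p) := by
  have ha : (p + 1).toNat ≤ k + 1 := by omega
  rw [Finset.range_eq_Ico,
    ← Finset.sum_Ico_consecutive (fun i => if (i : Int) ≤ p then (0 : Int) else v)
      (Nat.zero_le (p + 1).toNat) ha]
  have e1 : (∑ i ∈ Finset.Ico 0 (p + 1).toNat, (if (i : Int) ≤ p then (0 : Int) else v)) = 0 := by
    apply Finset.sum_eq_zero
    intro i hi
    rw [Finset.mem_Ico] at hi
    rw [if_pos (by omega)]
  have e2 : (∑ i ∈ Finset.Ico (p + 1).toNat (k + 1), (if (i : Int) ≤ p then (0 : Int) else v))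
      = ((k + 1 - (p + 1).toNat : Nat) : Int) * v := by
    have hc : ∀ i ∈ Finset.Ico (p + 1).toNat (k + 1),
        (if (i : Int) ≤ p then (0 : Int) else v) = v := by
      intro i hi
      rw [Finset.mem_Ico] at hi
      rw [if_neg (by omega)]
    rw [Finset.sum_congr rfl hc, Finset.sum_const, Nat.card_Ico, nsmul_eq_mul]
  rw [e1, e2, zero_add]
  have : ((k + 1 - (p + 1).toNat : Nat) : Int) = (k : Int) - p := by omega
  rw [this, mul_comm]

theorem tri_swap (n : Nat) (f : Nat → Nat → Int) :
    (∑ i ∈ Finset.range n, ∑ k ∈ Finset.Ico i n, f i k)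
      = ∑ k ∈ Finset.range n, ∑ i ∈ Finset.range (k + 1), f i k := by
  induction n with
  | zero => simp
  | succ n ih =>
    have h1 : (∑ i ∈ Finset.range (n + 1), ∑ k ∈ Finset.Ico i (n + 1), f i k)
        = ∑ i ∈ Finset.range (n + 1), ((∑ k ∈ Finset.Ico i n, f i k) + f i n) := by
      apply Finset.sum_congr rfl
      intro i hi
      rw [Finset.mem_range] at hi
      exact Finset.sum_Ico_succ_top (by omega) _
    rw [h1, Finset.sum_add_distrib, Finset.sum_range_succ (fun i => ∑ k ∈ Finset.Ico i n, f i k),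
      Finset.Ico_self, Finset.sum_empty, add_zero, ih,
      Finset.sum_range_succ (fun k => ∑ i ∈ Finset.range (k + 1), f i k)]

theorem double_to_weighted (m : Nat) (g : Nat → Int) :
    (∑ j ∈ Finset.range m, ∑ k ∈ Finset.range (j + 1), g k)
      = ∑ k ∈ Finset.range m, ((m - k : Nat) : Int) * g k := by
  induction m with
  | zero => simp
  | succ m ih =>
    rw [Finset.sum_range_succ (fun j => ∑ k ∈ Finset.range (j + 1), g k), ih,
      Finset.sum_range_succ (fun k => ((m + 1 - k : Nat) : Int) * g k),
      Finset.sum_range_succ g]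
    have e : (∑ k ∈ Finset.range m, ((m + 1 - k : Nat) : Int) * g k)
        = ∑ k ∈ Finset.range m, (((m - k : Nat) : Int) * g k + g k) := by
      apply Finset.sum_congr rfl
      intro k hk
      rw [Finset.mem_range] at hk
      have : ((m + 1 - k : Nat) : Int) = ((m - k : Nat) : Int) + 1 := by omega
      rw [this]; ring
    rw [e, Finset.sum_add_distrib]
    have : ((m + 1 - m : Nat) : Int) = 1 := by omega
    rw [this]; ring

theorem cIf_zero (pre l : List Int) (v : Int) :
    cIf pre (v :: l) 0 = if v ∈ pre then 0 else v := by
  simp [cIf]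

theorem cIf_succ (pre l : List Int) (v : Int) (k : Nat) :
    cIf pre (v :: l) (k + 1) = cIf (pre ++ [v]) l k := by
  simp only [cIf, List.getD_cons_succ, List.take_succ_cons]
  rw [List.append_cons]

theorem drowA_spec (l : List Int) : ∀ (pre : List Int) (t : Int),
    drowA (PySem.Set.ofList pre, t) l
      = ∑ j ∈ Finset.range l.length, (t + ∑ k ∈ Finset.range (j + 1), cIf pre l k) := by
  induction l with
  | nil => intro pre t; simp [drowA]
  | cons v l ih =>
    intro pre t
    have hcur : (if PySem.Set.contains (PySem.Set.ofList pre, t).1 v then (PySem.Set.ofList pre, t)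
          else (PySem.Set.union (PySem.Set.ofList pre, t).1 [v], (PySem.Set.ofList pre, t).2 + v))
        = (PySem.Set.ofList (pre ++ [v]), if v ∈ pre then t else t + v) := by
      rw [PySem.Set.ofList_append_singleton]
      by_cases hv : v ∈ pre
      · rw [if_pos ((PySem.Set.contains_iff _ _).mpr ((PySem.Set.mem_ofList _ _).mpr hv)), if_pos hv,
          PySem.Set.add_of_mem ((PySem.Set.mem_ofList _ _).mpr hv)]
      · rw [if_neg (by simp [PySem.Set.mem_ofList, hv]), if_neg hv]
        rfl
    show (if PySem.Set.contains (PySem.Set.ofList pre, t).1 v then (PySem.Set.ofList pre, t)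
          else (PySem.Set.union (PySem.Set.ofList pre, t).1 [v], (PySem.Set.ofList pre, t).2 + v)).2
        + drowA _ l = _
    rw [hcur]
    set t' : Int := if v ∈ pre then t else t + v with ht'
    rw [ih (pre ++ [v]) t']
    rw [List.length_cons, Finset.sum_range_succ'
      (fun j => t + ∑ k ∈ Finset.range (j + 1), cIf pre (v :: l) k) l.length]
    have e0 : t + ∑ k ∈ Finset.range (0 + 1), cIf pre (v :: l) k = t' := by
      rw [zero_add, Finset.sum_range_one, cIf_zero, ht']
      split_ifs <;> ring
    have e1 : ∀ j, t + ∑ k ∈ Finset.range (j + 1 + 1), cIf pre (v :: l) k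
        = t' + ∑ k ∈ Finset.range (j + 1), cIf (pre ++ [v]) l k := by
      intro j
      rw [Finset.sum_range_succ' (fun k => cIf pre (v :: l) k) (j + 1)]
      have : (∑ k ∈ Finset.range (j + 1), cIf pre (v :: l) (k + 1))
          = ∑ k ∈ Finset.range (j + 1), cIf (pre ++ [v]) l k :=
        Finset.sum_congr rfl (fun k _ => cIf_succ pre l v k)
      rw [this, ht']
      split_ifs with h
      · rw [cIf_zero, if_pos h]; ring
      · rw [cIf_zero, if_neg h]; ring
    rw [e0]
    rw [Finset.sum_congr rfl (fun j _ => e1 j)]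
    ring

theorem drowA_closed (l : List Int) :
    drowA pvD0 l = ∑ k ∈ Finset.range l.length, ((l.length - k : Nat) : Int) * cIf [] l k := by
  have h0 : pvD0 = (PySem.Set.ofList [], (0 : Int)) := rfl
  rw [h0, drowA_spec l [] 0]
  simp only [zero_add]
  exact double_to_weighted l.length (cIf [] l)

theorem pyGetD_const (l : List (PySem.Set Int × Int)) (h : ∀ x ∈ l, x = pvD0) (i : Int) :
    PySem.List.pyGetD l i pvD0 = pvD0 := by
  have e : PySem.List.pyGetD l i pvD0 = (PySem.List.pyGet? l i).getD pvD0 := rfl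
  rw [e]
  rcases h' : PySem.List.pyGet? l i with _ | x
  · rfl
  · simpa using h x (PySem.List.mem_of_pyGet?_eq_some l h')

theorem pyGetD_toNat {α : Type} (l : List α) (i : Int) (d : α) (h0 : 0 ≤ i)
    (h : i.toNat < l.length) : PySem.List.pyGetD l i d = l.getD i.toNat d := by
  rw [PySem.List.pyGetD_eq_getElem l d h0 (by omega), List.getD_eq_getElem?_getD,
    List.getElem?_eq_getElem h]
  rfl

theorem getD_set_self {α : Type} (l : List α) (n : Nat) (v d : α) (h : n < l.length) :
    (l.set n v).getD n d = v := by
  rw [List.getD_eq_getElem?_getD, List.getElem?_set_self h]; rfl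

theorem getD_set_ne {α : Type} (l : List α) (n s : Nat) (v d : α) (h : n ≠ s) :
    (l.set n v).getD s d = l.getD s d := by
  rw [List.getD_eq_getElem?_getD, List.getElem?_set_ne h, ← List.getD_eq_getElem?_getD]

theorem innerA (nums : List Int) (i : Int) (hi : 0 ≤ i) (hilen : i.toNat < nums.length) :
    ∀ (m : Nat) (j : Int), 0 ≤ j → (((nums.length : Int) - j).toNat = m) →
    ∀ (res : Int) (mark : List (List (PySem.Set Int × Int))) (c : PySem.Set Int × Int),
    mark.length = nums.length →
    (mark.getD i.toNat []).length = nums.length →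
    PySem.List.pyGetD (mark.getD i.toNat []) (j - 1) (PySem.Set.empty, 0) = c →
    ((PySem.List.pyRange j (nums.length : Int) 1).foldl (funcInnerBody nums i) (res, mark)).1
        = res + drowA c (nums.drop j.toNat)
    ∧ ((PySem.List.pyRange j (nums.length : Int) 1).foldl (funcInnerBody nums i) (res, mark)).2.length = nums.length
    ∧ ∀ s : Nat, s ≠ i.toNat →
        ((PySem.List.pyRange j (nums.length : Int) 1).foldl (funcInnerBody nums i) (res, mark)).2.getD s []
          = mark.getD s [] := by
  intro m
  induction m with
  | zero =>
    intro j hj hm res mark c h1 h2 h3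
    rw [PySem.List.pyRange_one_eq_nil (by omega)]
    have hd : nums.drop j.toNat = [] := List.drop_eq_nil_of_le (by omega)
    simp [hd, drowA, h1]
  | succ m ih =>
    intro j hj hm res mark c h1 h2 h3
    have hjn : j < (nums.length : Int) := by omega
    have hjt : j.toNat < nums.length := by omega
    rw [PySem.List.pyRange_one_cons hjn, List.foldl_cons]
    -- evaluate the body
    have hrow : PySem.List.pyGetD mark i [] = mark.getD i.toNat [] :=
      pyGetD_toNat mark i [] hi (by omega)
    have hv : PySem.List.pyGetD nums j 0 = nums.getD j.toNat 0 :=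
      pyGetD_toNat nums j 0 hj (by omega)
    have hbody : funcInnerBody nums i (res, mark) j =
        (res + (if PySem.Set.contains c.1 (nums.getD j.toNat 0) then c
            else (PySem.Set.union c.1 [nums.getD j.toNat 0], c.2 + nums.getD j.toNat 0)).2,
          mark.set i.toNat ((mark.getD i.toNat []).set j.toNat
            (if PySem.Set.contains c.1 (nums.getD j.toNat 0) then c
            else (PySem.Set.union c.1 [nums.getD j.toNat 0], c.2 + nums.getD j.toNat 0)))) := by
      simp only [funcInnerBody, hrow, hv, h3]
      rw [PySem.List.pySetD_of_nonneg _ _ hj, PySem.List.pySetD_of_nonneg _ _ hi]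
    rw [hbody]
    set cur := (if PySem.Set.contains c.1 (nums.getD j.toNat 0) then c
        else (PySem.Set.union c.1 [nums.getD j.toNat 0], c.2 + nums.getD j.toNat 0)) with hcurdef
    set mark' := mark.set i.toNat ((mark.getD i.toNat []).set j.toNat cur) with hmark'
    have hm1 : mark'.length = nums.length := by rw [hmark', List.length_set, h1]
    have hrow' : mark'.getD i.toNat [] = (mark.getD i.toNat []).set j.toNat cur := by
      rw [hmark']; exact getD_set_self _ _ _ _ (by omega)
    have hlen' : (mark'.getD i.toNat []).length = nums.length := by
      rw [hrow', List.length_set, h2]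
    have hread : PySem.List.pyGetD (mark'.getD i.toNat []) ((j + 1) - 1) (PySem.Set.empty, 0) = cur := by
      have e : j + 1 - 1 = j := by ring
      rw [e, hrow', pyGetD_toNat _ j _ hj (by rw [List.length_set, h2]; omega)]
      exact getD_set_self _ _ _ _ (by omega)
    obtain ⟨e1, e2, e3⟩ := ih (j + 1) (by omega) (by omega) (res + cur.2) mark' cur hm1 hlen' hread
    have hdrop : nums.drop j.toNat = nums.getD j.toNat 0 :: nums.drop (j.toNat + 1) := by
      rw [List.drop_eq_getElem_cons hjt, List.getD_eq_getElem?_getD, List.getElem?_eq_getElem hjt]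
      rfl
    have htn : (j + 1).toNat = j.toNat + 1 := by omega
    refine ⟨?_, ?_, ?_⟩
    · rw [e1, htn, hdrop]
      show res + cur.2 + drowA cur (nums.drop (j.toNat + 1))
          = res + ((if PySem.Set.contains c.1 (nums.getD j.toNat 0) then c
              else (PySem.Set.union c.1 [nums.getD j.toNat 0], c.2 + nums.getD j.toNat 0)).2
            + drowA (if PySem.Set.contains c.1 (nums.getD j.toNat 0) then c
              else (PySem.Set.union c.1 [nums.getD j.toNat 0], c.2 + nums.getD j.toNat 0))
              (nums.drop (j.toNat + 1)))
      rw [← hcurdef]; ring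
    · exact e2
    · intro s hs
      rw [e3 s hs, hmark', getD_set_ne _ _ _ _ _ (fun h => hs h.symm)]

theorem outerA (nums : List Int) :
    ∀ (m : Nat) (i : Int), 0 ≤ i → (((nums.length : Int) - i).toNat = m) →
    ∀ (res : Int) (mark : List (List (PySem.Set Int × Int))),
    mark.length = nums.length →
    (∀ s : Nat, i.toNat ≤ s → s < nums.length →
        (mark.getD s []).length = nums.length ∧
        PySem.List.pyGetD (mark.getD s []) ((s : Int) - 1) (PySem.Set.empty, 0) = pvD0) →
    ((PySem.List.pyRange i (nums.length : Int) 1).foldl (funcOuterBody nums) (res, mark)).1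
      = res + ∑ r ∈ Finset.Ico i.toNat nums.length, drowA pvD0 (nums.drop r) := by
  intro m
  induction m with
  | zero =>
    intro i hi hm res mark h1 h2
    rw [PySem.List.pyRange_one_eq_nil (by omega), Finset.Ico_eq_empty (by omega)]
    simp
  | succ m ih =>
    intro i hi hm res mark h1 h2
    have hin : i < (nums.length : Int) := by omega
    have hit : i.toNat < nums.length := by omega
    rw [PySem.List.pyRange_one_cons hin, List.foldl_cons]
    obtain ⟨hl, hr⟩ := h2 i.toNat (le_refl _) hit
    have hread : PySem.List.pyGetD (mark.getD i.toNat []) (i - 1) (PySem.Set.empty, 0) = pvD0 := by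
      have : ((i.toNat : Nat) : Int) = i := by omega
      rw [← this]; exact hr
    obtain ⟨e1, e2, e3⟩ := innerA nums i hi hit (((nums.length : Int) - i).toNat) i hi rfl
      res mark pvD0 h1 hl hread
    show ((PySem.List.pyRange (i + 1) (nums.length : Int) 1).foldl (funcOuterBody nums)
        (funcOuterBody nums (res, mark) i)).1 = _
    have hfold : funcOuterBody nums (res, mark) i
        = ((PySem.List.pyRange i (nums.length : Int) 1).foldl (funcInnerBody nums i) (res, mark)) := rfl
    set mk1 := ((PySem.List.pyRange i (nums.length : Int) 1).foldl (funcInnerBody nums i) (res, mark)).2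
      with hmk1
    have hpair : funcOuterBody nums (res, mark) i = (res + drowA pvD0 (nums.drop i.toNat), mk1) := by
      rw [hfold, ← e1, hmk1]
    rw [hpair]
    rw [ih (i + 1) (by omega) (by omega) (res + drowA pvD0 (nums.drop i.toNat)) mk1 e2 ?_]
    · have htn : (i + 1).toNat = i.toNat + 1 := by omega
      rw [htn]
      have hsplit : (∑ r ∈ Finset.Ico i.toNat nums.length, drowA pvD0 (nums.drop r))
          = drowA pvD0 (nums.drop i.toNat)
            + ∑ r ∈ Finset.Ico (i.toNat + 1) nums.length, drowA pvD0 (nums.drop r) := by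
        rw [← Finset.sum_Ico_consecutive (fun r => drowA pvD0 (nums.drop r))
          (Nat.le_succ i.toNat) (by omega)]
        congr 1
        rw [Finset.sum_Ico_succ_top (le_refl i.toNat), Finset.Ico_self, Finset.sum_empty, zero_add]
      rw [hsplit]; ring
    · intro s hs1 hs2
      have hsne : s ≠ i.toNat := by omega
      rw [e3 s hsne]
      exact h2 s (by omega) hs2

theorem funcA_sum (nums : List Int) :
    func nums = ∑ r ∈ Finset.range nums.length, drowA pvD0 (nums.drop r) := by
  have hconst : ∀ x ∈ (PySem.List.pyRange 0 (nums.length : Int) 1).map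
      (fun _ => ((PySem.Set.empty : PySem.Set Int), (0 : Int))), x = pvD0 := by
    intro x hx
    rcases List.mem_map.mp hx with ⟨_, _, rfl⟩
    rfl
  have hrowlen : ((PySem.List.pyRange 0 (nums.length : Int) 1).map
      (fun _ => ((PySem.Set.empty : PySem.Set Int), (0 : Int)))).length = nums.length := by
    rw [List.length_map, PySem.List.length_pyRange_one]; omega
  have hmlen : ((PySem.List.pyRange 0 (nums.length : Int) 1).map
      (fun _ => (PySem.List.pyRange 0 (nums.length : Int) 1).map
        (fun _ => ((PySem.Set.empty : PySem.Set Int), (0 : Int))))).length = nums.length := by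
    rw [List.length_map, PySem.List.length_pyRange_one]; omega
  show ((PySem.List.pyRange 0 (nums.length : Int) 1).foldl (funcOuterBody nums) (0, _)).1 = _
  rw [outerA nums (((nums.length : Int) - 0).toNat) 0 (by omega) rfl 0 _ hmlen ?_]
  · rw [Int.toNat_zero, ← Finset.range_eq_Ico, zero_add]
  · intro s hs0 hs
    have hget : ((PySem.List.pyRange 0 (nums.length : Int) 1).map
        (fun _ => (PySem.List.pyRange 0 (nums.length : Int) 1).map
          (fun _ => ((PySem.Set.empty : PySem.Set Int), (0 : Int))))).getD s []
        = (PySem.List.pyRange 0 (nums.length : Int) 1).map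
          (fun _ => ((PySem.Set.empty : PySem.Set Int), (0 : Int))) := by
      rw [List.getD_eq_getElem?_getD, List.getElem?_eq_getElem (by rw [hmlen]; omega)]
      simp
    rw [hget]
    refine ⟨hrowlen, ?_⟩
    have : ((PySem.Set.empty : PySem.Set Int), (0 : Int)) = pvD0 := rfl
    rw [this]
    exact pyGetD_const _ hconst _

theorem getD_drop (nums : List Int) (i j : Nat) :
    (nums.drop i).getD j 0 = nums.getD (i + j) 0 := by
  rw [List.getD_eq_getElem?_getD, List.getD_eq_getElem?_getD, List.getElem?_drop]

theorem inner_count (nums : List Int) (k : Nat) (hk : k < nums.length) :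
    (∑ i ∈ Finset.range (k + 1),
        (if nums.getD k 0 ∈ (nums.drop i).take (k - i) then 0 else nums.getD k 0))
      = nums.getD k 0 * ((k : Int) - lastOcc (nums.take k) (nums.getD k 0)) := by
  have hcong : ∀ i ∈ Finset.range (k + 1),
      (if nums.getD k 0 ∈ (nums.drop i).take (k - i) then (0 : Int) else nums.getD k 0)
        = (if (i : Int) ≤ lastOcc (nums.take k) (nums.getD k 0) then 0 else nums.getD k 0) := by
    intro i hi
    rw [← List.drop_take]
    simp only [mem_drop_iff_lastOcc]
  rw [Finset.sum_congr rfl hcong]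
  apply sum_ite_le
  · exact lastOcc_ge _ _
  · have := lastOcc_lt (nums.take k) (nums.getD k 0)
    rw [List.length_take] at this
    omega

theorem funcA_contrib (nums : List Int) :
    func nums = ∑ k ∈ Finset.range nums.length, contrib nums k := by
  rw [funcA_sum]
  have step1 : ∀ i ∈ Finset.range nums.length, drowA pvD0 (nums.drop i)
      = ∑ k ∈ Finset.Ico i nums.length, ((nums.length - k : Nat) : Int)
          * (if nums.getD k 0 ∈ (nums.drop i).take (k - i) then 0 else nums.getD k 0) := by
    intro i hi
    rw [Finset.mem_range] at hi
    rw [drowA_closed, Finset.sum_Ico_eq_sum_range, List.length_drop]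
    apply Finset.sum_congr rfl
    intro j hj
    rw [Finset.mem_range] at hj
    have e1 : (nums.length - (i + j) : Nat) = (nums.length - i - j : Nat) := by omega
    have e2 : (i + j) - i = j := by omega
    have e3 : cIf [] (nums.drop i) j
        = (if nums.getD (i + j) 0 ∈ (nums.drop i).take j then (0 : Int) else nums.getD (i + j) 0) := by
      rw [cIf, List.nil_append, getD_drop]
    rw [e1, e2, e3]
  rw [Finset.sum_congr rfl step1]
  rw [tri_swap nums.length (fun i k => ((nums.length - k : Nat) : Int)
      * (if nums.getD k 0 ∈ (nums.drop i).take (k - i) then 0 else nums.getD k 0))]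
  apply Finset.sum_congr rfl
  intro k hk
  rw [Finset.mem_range] at hk
  rw [← Finset.mul_sum, inner_count nums k hk, contrib]
  have : ((nums.length - k : Nat) : Int) = (nums.length : Int) - (k : Int) := by omega
  rw [this]; ring

theorem altLoop (n : Int) :
    ∀ (l pre : List Int) (res : Int) (d : PySem.Dict Int Int),
    (∀ v : Int, PySem.Dict.getD d v (-1) = lastOcc pre v) →
    ((PySem.List.enumerate l (pre.length : Int)).foldl (funcAltBody n) (res, d)).1
      = res + ∑ k ∈ Finset.range l.length,
          l.getD k 0 * (((pre.length + k : Nat) : Int) - lastOcc (pre ++ l.take k) (l.getD k 0))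
            * (n - ((pre.length + k : Nat) : Int)) := by
  intro l
  induction l with
  | nil => intro pre res d hd; simp
  | cons v t ih =>
    intro pre res d hd
    rw [PySem.List.enumerate_cons, List.foldl_cons]
    have hbody : funcAltBody n (res, d) ((pre.length : Int), v)
        = (res + v * ((pre.length : Int) - lastOcc pre v) * (n - (pre.length : Int)),
            PySem.Dict.insert d v (pre.length : Int)) := by
      simp only [funcAltBody, hd v]
    rw [hbody]
    have hlen : ((pre.length : Int) + 1) = (((pre ++ [v]).length : Nat) : Int) := by
      rw [List.length_append, List.length_singleton]; push_cast; ring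
    have hd' : ∀ w : Int, PySem.Dict.getD (PySem.Dict.insert d v (pre.length : Int)) w (-1)
        = lastOcc (pre ++ [v]) w := by
      intro w
      rw [PySem.Dict.getD_insert, lastOcc_append_singleton]
      rcases eq_or_ne w v with rfl | h
      · rw [if_pos rfl, if_pos rfl]
      · rw [if_neg h, if_neg h, hd w]
    rw [hlen, ih (pre ++ [v]) _ _ hd']
    rw [List.length_cons, Finset.sum_range_succ'
      (fun k => (v :: t).getD k 0 * (((pre.length + k : Nat) : Int)
        - lastOcc (pre ++ (v :: t).take k) ((v :: t).getD k 0))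
        * (n - ((pre.length + k : Nat) : Int))) t.length]
    have e0 : (v :: t).getD 0 0 * (((pre.length + 0 : Nat) : Int)
        - lastOcc (pre ++ (v :: t).take 0) ((v :: t).getD 0 0))
        * (n - ((pre.length + 0 : Nat) : Int))
        = v * ((pre.length : Int) - lastOcc pre v) * (n - (pre.length : Int)) := by
      simp
    have e1 : ∀ k, (v :: t).getD (k + 1) 0 * (((pre.length + (k + 1) : Nat) : Int)
        - lastOcc (pre ++ (v :: t).take (k + 1)) ((v :: t).getD (k + 1) 0))
        * (n - ((pre.length + (k + 1) : Nat) : Int))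
        = t.getD k 0 * ((((pre ++ [v]).length + k : Nat) : Int)
            - lastOcc ((pre ++ [v]) ++ t.take k) (t.getD k 0))
          * (n - (((pre ++ [v]).length + k : Nat) : Int)) := by
      intro k
      have ha : pre ++ (v :: t).take (k + 1) = (pre ++ [v]) ++ t.take k := by
        rw [List.take_succ_cons, List.append_cons]
      have hb : ((pre.length + (k + 1) : Nat) : Int) = (((pre ++ [v]).length + k : Nat) : Int) := by
        rw [List.length_append, List.length_singleton]; push_cast; ring
      rw [List.getD_cons_succ, ha, hb]
    rw [e0, Finset.sum_congr rfl (fun k _ => e1 k)]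
    ring

theorem funcAlt_contrib (nums : List Int) :
    func_alt nums = ∑ k ∈ Finset.range nums.length, contrib nums k := by
  have h := altLoop (nums.length : Int) nums [] 0 PySem.Dict.empty
    (by intro v; rw [PySem.Dict.getD_empty]; rfl)
  have e : ((([] : List Int).length : Nat) : Int) = 0 := rfl
  rw [e] at h
  show ((PySem.List.enumerate nums 0).foldl (funcAltBody (nums.length : Int)) (0, PySem.Dict.empty)).1 = _
  rw [h, zero_add]
  apply Finset.sum_congr rfl
  intro k hk
  rw [contrib]
  simp

-- ===== VERDICT (by name: the statement is the Claim_ definition above) =====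
theorem func_spec : Claim_equal_func := by
  intro nums _
  unfold Spec_func
  rw [funcA_contrib, funcAlt_contrib]
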